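-- pv_equiv track=rewrite | github.com/spcl/sten | src/sten/grouped_nm/matmul_generator.py | infer_reordered_shape
-- ===== SOURCE A (Python) =====
-- def infer_reordered_shape(dims, pos_to_idx):
--     n = len(dims)
--     strides = [None for _ in range(n)]
--     idx_to_pos = [None for i in range(n)]
--     for pos, idx in enumerate(pos_to_idx):
--         idx_to_pos[idx] = pos
--     for idx in range(n - 1, -1, -1):
--         pos = idx_to_pos[idx]
--         if idx == n - 1:
--             strides[pos] = "1"
--         else:
--             pos_next = idx_to_pos[idx + 1]
--             strides[pos] = f"{dims[pos_next]} * {strides[pos_next]}"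
--     return list(zip(dims, strides))
-- ===== SOURCE B (Python) =====
-- def infer_reordered_shape(dims, pos_to_idx):
--     n = len(dims)
--     idx_to_pos = [None] * n
--     for pos, idx in enumerate(pos_to_idx):
--         idx_to_pos[idx] = pos
--     strides = [None] * n
--     for idx in range(n):
--         suffix = [dims[idx_to_pos[j]] for j in range(idx + 1, n)]
--         strides[idx_to_pos[idx]] = " * ".join(suffix + ["1"])
--     return list(zip(dims, strides))
-- ===== Notes on version B (the rewrite author's own statement) =====
-- stated objective: alternative
-- what changed: B keeps the inverse-permutation pass but replaces A's backward recurrence (each stride string built from the previously stored stride of the next index) by a forward loop that computes each stride independently in closed form: ' * '.join of the dims of all higher reorder-indices plus '1'.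
import Mathlib
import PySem

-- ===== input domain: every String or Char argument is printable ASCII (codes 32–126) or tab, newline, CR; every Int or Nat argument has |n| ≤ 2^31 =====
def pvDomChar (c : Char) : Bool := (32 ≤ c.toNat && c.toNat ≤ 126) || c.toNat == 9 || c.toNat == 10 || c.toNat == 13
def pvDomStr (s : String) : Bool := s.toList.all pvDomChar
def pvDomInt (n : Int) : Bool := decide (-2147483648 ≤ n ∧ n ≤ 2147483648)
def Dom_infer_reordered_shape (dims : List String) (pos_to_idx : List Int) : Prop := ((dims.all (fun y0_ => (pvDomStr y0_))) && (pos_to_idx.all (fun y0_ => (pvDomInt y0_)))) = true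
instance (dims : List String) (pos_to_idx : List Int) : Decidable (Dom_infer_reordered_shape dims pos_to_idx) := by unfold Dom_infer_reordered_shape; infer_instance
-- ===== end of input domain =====

-- B replaces A's backward recurrence (each stride read back from the previously filled slot)
-- by a forward loop computing every stride independently in closed form:
-- " * ".join of the dims of all higher reorder-indices plus "1" (alternative decomposition; not faster).

-- ===== PORT A =====
-- first pass of A: for pos, idx in enumerate(pos_to_idx): idx_to_pos[idx] = pos
-- `none` result = the pass raised IndexError; `none` entries = slots Python leaves as None
def pvBuildPos (n : Nat) (pos_to_idx : List Int) : Option (List (Option Int)) :=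
  (PySem.List.enumerate pos_to_idx).foldl
    (fun acc pi => acc.bind (fun l => PySem.List.pySet? l pi.2 (some pi.1)))
    (some (List.replicate n none))

-- one iteration of A's backward loop (state = strides; none = the loop raised)
def pvStepA (dims : List String) (itp : List (Option Int))
    (acc : Option (List (Option String))) (idx : Int) : Option (List (Option String)) :=
  acc.bind (fun strides =>
    match PySem.List.pyGet? itp idx with
    | none => none
    | some none => none            -- pos is None: strides[None] raises TypeError
    | some (some pos) =>
      if idx = (dims.length : Int) - 1 then PySem.List.pySet? strides pos (some "1")
      else
        match PySem.List.pyGet? itp (idx + 1) with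
        | none => none
        | some none => none
        | some (some posn) =>
          match PySem.List.pyGet? dims posn, PySem.List.pyGet? strides posn with
          | some d, some (some s) => PySem.List.pySet? strides pos (some (d ++ " * " ++ s))
          | _, _ => none)          -- unreachable when the previous iteration wrote strides[posn]

def infer_reordered_shape (dims : List String) (pos_to_idx : List Int) : List (String × String) :=
  match pvBuildPos dims.length pos_to_idx with
  | none => []                     -- Python raised; unreachable under Pre_
  | some idx_to_pos =>
    match (PySem.List.pyRange ((dims.length : Int) - 1) (-1) (-1)).foldl
        (pvStepA dims idx_to_pos)
        (some (List.replicate dims.length (none : Option String))) with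
    | none => []                   -- Python raised; unreachable under Pre_
    | some strides => dims.zip (strides.map (fun o => o.getD ""))
        -- getD "" is unreachable under Pre_: every slot has been written

-- ===== PORT B =====
-- the comprehension [dims[idx_to_pos[j]] for j in range(a, b)] (none = it raised)
def pvGatherB (dims : List String) (itp : List (Option Int)) (a b : Int) : Option (List String) :=
  (PySem.List.pyRange a b 1).foldl
    (fun acc j => acc.bind (fun l =>
      match PySem.List.pyGet? itp j with
      | some (some p) => (PySem.List.pyGet? dims p).map (fun d => l ++ [d])
      | _ => none))
    (some [])

-- one iteration of B's forward loop (state = strides; none = the loop raised)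
def pvStepB (dims : List String) (itp : List (Option Int))
    (st : Option (List (Option String))) (idx : Int) : Option (List (Option String)) :=
  st.bind (fun strides =>
    (pvGatherB dims itp (idx + 1) (dims.length : Int)).bind (fun suffix =>
      match PySem.List.pyGet? itp idx with
      | some (some pos) =>
          PySem.List.pySet? strides pos (some (PySem.Str.join " * " (suffix ++ ["1"])))
      | _ => none))                -- pos is None: strides[None] raises TypeError

def infer_reordered_shape_alt (dims : List String) (pos_to_idx : List Int) : List (String × String) :=
  match pvBuildPos dims.length pos_to_idx with
  | none => []                     -- Python raised; unreachable under Pre_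
  | some idx_to_pos =>
    match (PySem.List.pyRange 0 (dims.length : Int) 1).foldl (pvStepB dims idx_to_pos)
        (some (List.replicate dims.length (none : Option String))) with
    | none => []                   -- Python raised; unreachable under Pre_
    | some strides => dims.zip (strides.map (fun o => o.getD ""))

-- ===== PRECONDITION & SPEC =====
-- Python's wrap of a possibly negative index into [0, n)
def pvWrapN (n : Nat) (e : Int) : Nat := if e < 0 then (e + n).toNat else e.toNat

-- Exactly the inputs on which the Python A returns normally: pos_to_idx must have the same length
-- as dims, every entry a valid (possibly negative) index into idx_to_pos, and the wrapped indices
-- pairwise distinct — otherwise A raises IndexError or TypeError (strides[None]).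
def Pre_infer_reordered_shape (dims : List String) (pos_to_idx : List Int) : Prop :=
  pos_to_idx.length = dims.length ∧
  (∀ e ∈ pos_to_idx, -(dims.length : Int) ≤ e ∧ e < (dims.length : Int)) ∧
  (pos_to_idx.map (pvWrapN dims.length)).Nodup
instance (dims : List String) (pos_to_idx : List Int) : Decidable (Pre_infer_reordered_shape dims pos_to_idx) := by unfold Pre_infer_reordered_shape; infer_instance

def pvWitness_infer_reordered_shape : List String × List Int := (["a", "b", "c"], [2, 0, 1])

def Spec_infer_reordered_shape (dims : List String) (pos_to_idx : List Int) (out : List (String × String)) : Prop := out = infer_reordered_shape_alt dims pos_to_idx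
instance (dims : List String) (pos_to_idx : List Int) (out : List (String × String)) : Decidable (Spec_infer_reordered_shape dims pos_to_idx out) := by unfold Spec_infer_reordered_shape; infer_instance

-- ===== CLAIM (what is proved, stated in full; the proofs are below) =====
def Claim_equal_infer_reordered_shape : Prop := ∀ (dims : List String) (pos_to_idx : List Int), Dom_infer_reordered_shape dims pos_to_idx → Pre_infer_reordered_shape dims pos_to_idx → Spec_infer_reordered_shape dims pos_to_idx (infer_reordered_shape dims pos_to_idx)

-- ===== LEMMAS AND PROOFS =====

-- the closed-form stride string: S f dims idx = "d_{f(idx+1)} * … * d_{f(n-1)} * 1"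
def pvS (dims : List String) (f : Nat → Nat) (idx : Nat) : String :=
  PySem.Str.join " * "
    (((List.range' (idx + 1) (dims.length - (idx + 1))).map (fun j => dims.getD (f j) "")) ++ ["1"])

-- the common final strides list: slot k was written at loop index g k
def pvT (dims : List String) (f g : Nat → Nat) : List (Option String) :=
  (List.range dims.length).map (fun k => some (pvS dims f (g k)))

theorem pv_join_singleton (p : String) : PySem.Str.join " * " [p] = p := by
  rw [← String.toList_inj, PySem.Str.toList_join]
  simp [PySem.Chars.join_singleton]

theorem pv_join_cons (p q : String) (rest : List String) :
    PySem.Str.join " * " (p :: q :: rest) = p ++ " * " ++ PySem.Str.join " * " (q :: rest) := by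
  rw [← String.toList_inj, PySem.Str.toList_join]
  simp [PySem.Chars.join_cons_cons, PySem.Str.toList_join]

-- the recurrence A follows, derived from the closed form B computes
theorem pvS_last (dims : List String) (f : Nat → Nat) :
    pvS dims f (dims.length - 1) = "1" := by
  unfold pvS
  have h : dims.length - (dims.length - 1 + 1) = 0 := by omega
  rw [h]
  simp only [List.range'_zero, List.map_nil, List.nil_append]
  exact pv_join_singleton "1"

theorem pvS_step (dims : List String) (f : Nat → Nat) (t : Nat) (h : t + 1 < dims.length) :
    pvS dims f t = dims.getD (f (t + 1)) "" ++ " * " ++ pvS dims f (t + 1) := by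
  unfold pvS
  have h1 : dims.length - (t + 1) = (dims.length - (t + 2)) + 1 := by omega
  rw [h1, List.range'_succ, List.map_cons, List.cons_append]
  have h2 : dims.length - (t + 1 + 1) = dims.length - (t + 2) := by omega
  rw [h2]
  cases h3 : (List.range' (t + 1 + 1) (dims.length - (t + 2))).map (fun j => dims.getD (f j) "")
      ++ ["1"] with
  | nil => exact absurd h3 (by simp)
  | cons x xs => exact pv_join_cons _ x xs

theorem pv_pyIdx?_of_bounds (n : Nat) (e : Int) (h1 : -(n : Int) ≤ e) (h2 : e < n) :
    PySem.List.pyIdx? n e = some (pvWrapN n e) := by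
  unfold PySem.List.pyIdx? pvWrapN
  by_cases h : 0 ≤ e
  · rw [if_pos h, if_pos (by omega), if_neg (by omega)]
  · rw [if_neg h, if_pos (by omega), if_pos (by omega)]
    congr 1
    omega

theorem pv_wrapN_lt (n : Nat) (e : Int) (h1 : -(n : Int) ≤ e) (h2 : e < n) :
    pvWrapN n e < n := by
  unfold pvWrapN; split_ifs <;> omega

-- ========== characterisation of the shared first pass ==========

theorem pv_build_go (n : Nat) (pta : List Int) :
    ∀ (s : Int) (L0 : List (Option Int)),
    L0.length = n →
    (∀ e ∈ pta, -(n : Int) ≤ e ∧ e < n) →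
    (pta.map (pvWrapN n)).Nodup →
    ∃ Lf,
      (PySem.List.enumerate pta s).foldl
        (fun acc pi => acc.bind (fun l => PySem.List.pySet? l pi.2 (some pi.1))) (some L0)
        = some Lf ∧
      Lf.length = n ∧
      (∀ k, (h : k < pta.length) → Lf[pvWrapN n (pta[k])]? = some (some (s + k))) ∧
      (∀ j, j ∉ pta.map (pvWrapN n) → Lf[j]? = L0[j]?) := by
  induction pta with
  | nil =>
    intro s L0 hL0 _ _
    exact ⟨L0, by simp [PySem.List.enumerate], hL0, by intro k h; simp at h, fun j _ => rfl⟩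
  | cons e t ih =>
    intro s L0 hL0 hbd hnd
    have hbe := hbd e (by simp)
    have hwlt : pvWrapN n e < n := pv_wrapN_lt n e hbe.1 hbe.2
    have hset : PySem.List.pySet? L0 e (some s) = some (L0.set (pvWrapN n e) (some s)) := by
      unfold PySem.List.pySet?
      rw [hL0, pv_pyIdx?_of_bounds n e hbe.1 hbe.2]
      rfl
    simp only [List.map_cons, List.nodup_cons] at hnd
    obtain ⟨Lf, hfold, hlen, hval, hout⟩ :=
      ih (s + 1) (L0.set (pvWrapN n e) (some s)) (by simp [hL0])
        (fun x hx => hbd x (by simp [hx])) hnd.2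
    refine ⟨Lf, ?_, hlen, ?_, ?_⟩
    · rw [PySem.List.enumerate_cons, List.foldl_cons, Option.bind_some, hset]
      exact hfold
    · intro k hk
      match k with
      | 0 =>
        simp only [List.getElem_cons_zero]
        rw [hout (pvWrapN n e) hnd.1]
        rw [List.getElem?_set_self (by omega)]
        norm_num
      | k + 1 =>
        have hk' : k < t.length := by simp at hk; omega
        have h5 := hval k hk'
        simp only [List.getElem_cons_succ]
        rw [h5]
        congr 2
        push_cast
        ring
    · intro j hj
      simp only [List.map_cons, List.mem_cons] at hj
      push Not at hj
      rw [hout j hj.2, List.getElem?_set_ne (Ne.symm hj.1)]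

-- ========== the two loops, abstractly ==========
-- f : loop index ↦ slot written (= value stored in idx_to_pos), g its inverse

theorem pv_loopA (dims : List String) (itp : List (Option Int)) (f g : Nat → Nat)
    (_hlen : itp.length = dims.length)
    (hf : ∀ k, k < dims.length → itp[k]? = some (some ((f k : Nat) : Int)))
    (hfn : ∀ k, k < dims.length → f k < dims.length)
    (hgf : ∀ k, k < dims.length → g (f k) = k)
    (hfg : ∀ k, k < dims.length → f (g k) = k) :
    ∀ (t : Nat), t ≤ dims.length →
    ∀ (st : List (Option String)), st.length = dims.length →
    (∀ k, (hk : k < dims.length) →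
        st[k]? = some (if t ≤ g k then some (pvS dims f (g k)) else none)) →
    (PySem.List.pyRange ((t : Int) - 1) (-1) (-1)).foldl (pvStepA dims itp) (some st)
      = some (pvT dims f g) := by
  intro t
  induction t with
  | zero =>
    intro _ st hstl hst
    rw [PySem.List.pyRange_neg_one_eq_nil (by omega)]
    simp only [List.foldl_nil]
    congr 1
    apply List.ext_getElem?
    intro i
    by_cases hi : i < dims.length
    · rw [hst i hi]
      simp [pvT, hi]
    · rw [List.getElem?_eq_none (by omega)]
      rw [List.getElem?_eq_none (by simp [pvT]; omega)]
  | succ t ih =>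
    intro ht st hstl hst
    have hc : ((t + 1 : Nat) : Int) - 1 = (t : Int) := by push_cast; ring
    rw [hc, PySem.List.pyRange_neg_one_cons (by omega : (-1 : Int) < (t : Int)), List.foldl_cons]
    -- the step at idx = t
    have htn : t < dims.length := by omega
    have hgett : PySem.List.pyGet? itp (t : Int) = some (some ((f t : Nat) : Int)) := by
      rw [PySem.List.pyGet?_natCast]; exact hf t htn
    have hft : f t < dims.length := hfn t htn
    have hsetA : PySem.List.pySet? st ((f t : Nat) : Int) (some (pvS dims f t))
        = some (st.set (f t) (some (pvS dims f t))) :=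
      PySem.List.pySet?_natCast st (f t) _ (by omega)
    have hstep : pvStepA dims itp (some st) (t : Int)
        = some (st.set (f t) (some (pvS dims f t))) := by
      simp only [pvStepA, Option.bind_some, hgett]
      by_cases hlast : (t : Int) = (dims.length : Int) - 1
      · rw [if_pos hlast]
        have h' : t = dims.length - 1 := by omega
        have h1 : pvS dims f t = "1" := by rw [h']; exact pvS_last dims f
        rw [← h1]
        exact hsetA
      · rw [if_neg hlast]
        have ht1 : t + 1 < dims.length := by omega
        have hget1 : PySem.List.pyGet? itp ((t : Int) + 1)
            = some (some ((f (t + 1) : Nat) : Int)) := by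
          rw [show ((t : Int) + 1) = ((t + 1 : Nat) : Int) by push_cast; ring]
          rw [PySem.List.pyGet?_natCast]; exact hf (t + 1) ht1
        have hft1 : f (t + 1) < dims.length := hfn (t + 1) ht1
        have hd : PySem.List.pyGet? dims ((f (t + 1) : Nat) : Int)
            = some (dims.getD (f (t + 1)) "") := by
          rw [PySem.List.pyGet?_natCast, List.getElem?_eq_getElem hft1,
            List.getD_eq_getElem dims "" hft1]
        have hs : PySem.List.pyGet? st ((f (t + 1) : Nat) : Int)
            = some (some (pvS dims f (t + 1))) := by
          rw [PySem.List.pyGet?_natCast]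
          rw [hst (f (t + 1)) hft1, hgf (t + 1) ht1]
          simp
        simp only [hget1, hd, hs]
        rw [← pvS_step dims f t ht1]
        exact hsetA
    rw [hstep]
    apply ih (by omega) _ (by simp [hstl])
    intro k hk
    by_cases hkft : k = f t
    · subst hkft
      rw [List.getElem?_set_self (by omega), hgf t htn, if_pos (le_refl t)]
    · rw [List.getElem?_set_ne (Ne.symm hkft), hst k hk]
      have hne : g k ≠ t := fun h => hkft (by rw [← hfg k hk, h])
      by_cases h' : t ≤ g k
      · rw [if_pos h', if_pos (by omega)]
      · rw [if_neg h', if_neg (by omega)]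

-- the comprehension inside B's loop collects exactly the dims of the higher reorder-indices
theorem pv_gatherB (dims : List String) (itp : List (Option Int)) (f : Nat → Nat)
    (hf : ∀ k, k < dims.length → itp[k]? = some (some ((f k : Nat) : Int)))
    (hfn : ∀ k, k < dims.length → f k < dims.length) :
    ∀ (m a : Nat), a + m = dims.length →
    ∀ (l0 : List String),
    (PySem.List.pyRange (a : Int) (dims.length : Int) 1).foldl
      (fun acc j => acc.bind (fun l =>
        match PySem.List.pyGet? itp j with
        | some (some p) => (PySem.List.pyGet? dims p).map (fun d => l ++ [d])
        | _ => none)) (some l0)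
      = some (l0 ++ (List.range' a m).map (fun j => dims.getD (f j) "")) := by
  intro m
  induction m with
  | zero =>
    intro a ha l0
    rw [PySem.List.pyRange_one_eq_nil (by omega)]
    simp
  | succ m ih =>
    intro a ha l0
    rw [PySem.List.pyRange_one_cons (by omega : (a : Int) < (dims.length : Int)), List.foldl_cons]
    have han : a < dims.length := by omega
    have hget : PySem.List.pyGet? itp (a : Int) = some (some ((f a : Nat) : Int)) := by
      rw [PySem.List.pyGet?_natCast]; exact hf a han
    have hfa : f a < dims.length := hfn a han
    have hd : PySem.List.pyGet? dims ((f a : Nat) : Int) = some (dims.getD (f a) "") := by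
      rw [PySem.List.pyGet?_natCast, List.getElem?_eq_getElem hfa,
        List.getD_eq_getElem dims "" hfa]
    simp only [Option.bind_some, hget, hd, Option.map_some]
    rw [show ((a : Int) + 1) = ((a + 1 : Nat) : Int) by push_cast; ring]
    rw [ih (a + 1) (by omega) (l0 ++ [dims.getD (f a) ""])]
    rw [List.range'_succ, List.map_cons]
    simp

theorem pv_loopB (dims : List String) (itp : List (Option Int)) (f g : Nat → Nat)
    (_hlen : itp.length = dims.length)
    (hf : ∀ k, k < dims.length → itp[k]? = some (some ((f k : Nat) : Int)))
    (hfn : ∀ k, k < dims.length → f k < dims.length)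
    (hgf : ∀ k, k < dims.length → g (f k) = k)
    (hfg : ∀ k, k < dims.length → f (g k) = k)
    (hg : ∀ k, k < dims.length → g k < dims.length) :
    ∀ (m t : Nat), t + m = dims.length →
    ∀ (st : List (Option String)), st.length = dims.length →
    (∀ k, (hk : k < dims.length) →
        st[k]? = some (if g k < t then some (pvS dims f (g k)) else none)) →
    (PySem.List.pyRange (t : Int) (dims.length : Int) 1).foldl (pvStepB dims itp) (some st)
      = some (pvT dims f g) := by
  intro m
  induction m with
  | zero =>
    intro t ht st hstl hst
    rw [PySem.List.pyRange_one_eq_nil (by omega)]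
    simp only [List.foldl_nil]
    congr 1
    apply List.ext_getElem?
    intro i
    by_cases hi : i < dims.length
    · rw [hst i hi, if_pos (by have := hg i hi; omega)]
      simp [pvT, hi]
    · rw [List.getElem?_eq_none (by omega)]
      rw [List.getElem?_eq_none (by simp [pvT]; omega)]
  | succ m ih =>
    intro t ht st hstl hst
    rw [PySem.List.pyRange_one_cons (by omega : (t : Int) < (dims.length : Int)), List.foldl_cons]
    have htn : t < dims.length := by omega
    have hgather : pvGatherB dims itp ((t : Int) + 1) (dims.length : Int)
        = some ((List.range' (t + 1) m).map (fun j => dims.getD (f j) "")) := by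
      unfold pvGatherB
      rw [show ((t : Int) + 1) = ((t + 1 : Nat) : Int) by push_cast; ring]
      rw [pv_gatherB dims itp f hf hfn m (t + 1) (by omega) []]
      simp
    have hgett : PySem.List.pyGet? itp (t : Int) = some (some ((f t : Nat) : Int)) := by
      rw [PySem.List.pyGet?_natCast]; exact hf t htn
    have hft : f t < dims.length := hfn t htn
    have hval : PySem.Str.join " * "
        ((List.range' (t + 1) m).map (fun j => dims.getD (f j) "") ++ ["1"]) = pvS dims f t := by
      unfold pvS
      have : dims.length - (t + 1) = m := by omega
      rw [this]
    have hstep : pvStepB dims itp (some st) (t : Int)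
        = some (st.set (f t) (some (pvS dims f t))) := by
      simp only [pvStepB, Option.bind_some, hgather, hgett, hval]
      exact PySem.List.pySet?_natCast st (f t) _ (by omega)
    rw [hstep]
    apply ih (t + 1) (by omega) _ (by simp [hstl])
    intro k hk
    by_cases hkft : k = f t
    · subst hkft
      rw [List.getElem?_set_self (by omega), hgf t htn, if_pos (by omega)]
    · rw [List.getElem?_set_ne (Ne.symm hkft), hst k hk]
      have hne : g k ≠ t := fun h => hkft (by rw [← hfg k hk, h])
      by_cases h' : g k < t
      · rw [if_pos h', if_pos (by omega)]
      · rw [if_neg h', if_neg (by omega)]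

-- ========== assembling: under Pre_ the shared pass yields a bijection ==========

theorem pv_ports_eq (dims : List String) (pos_to_idx : List Int)
    (hpre : Pre_infer_reordered_shape dims pos_to_idx) :
    infer_reordered_shape dims pos_to_idx = infer_reordered_shape_alt dims pos_to_idx := by
  obtain ⟨hlen, hbd, hnd⟩ := hpre
  obtain ⟨Lf, hfold, hLlen, hval, _⟩ :=
    pv_build_go dims.length pos_to_idx 0 (List.replicate dims.length none)
      (by simp) hbd hnd
  have hbuild : pvBuildPos dims.length pos_to_idx = some Lf := hfold
  -- coverage: every slot below n is a wrapped index
  have hcov : ∀ k, k < dims.length → k ∈ pos_to_idx.map (pvWrapN dims.length) := by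
    intro k hk
    have hsub : (pos_to_idx.map (pvWrapN dims.length)).toFinset ⊆ Finset.range dims.length := by
      intro x hx
      rw [List.mem_toFinset, List.mem_map] at hx
      obtain ⟨e, he, rfl⟩ := hx
      exact Finset.mem_range.mpr (pv_wrapN_lt _ e (hbd e he).1 (hbd e he).2)
    have hcard : (Finset.range dims.length).card
        ≤ (pos_to_idx.map (pvWrapN dims.length)).toFinset.card := by
      rw [List.toFinset_card_of_nodup hnd, Finset.card_range, List.length_map, hlen]
    have heqf := Finset.eq_of_subset_of_card_le hsub hcard
    rw [← List.mem_toFinset, heqf]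
    exact Finset.mem_range.mpr hk
  -- g : value ↦ slot,  f : slot ↦ value
  set g : Nat → Nat := fun p => pvWrapN dims.length (pos_to_idx.getD p 0) with hgdef
  set f : Nat → Nat := fun k => ((Lf.getD k none).getD 0).toNat with hfdef
  have hvalg : ∀ p, p < dims.length → Lf[g p]? = some (some ((p : Nat) : Int)) := by
    intro p hp
    have hp' : p < pos_to_idx.length := by omega
    have h6 := hval p hp'
    rw [hgdef]
    simp only [List.getD_eq_getElem pos_to_idx 0 hp']
    simpa using h6
  have hg : ∀ p, p < dims.length → g p < dims.length := by
    intro p hp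
    have hp' : p < pos_to_idx.length := by omega
    rw [hgdef]
    simp only [List.getD_eq_getElem pos_to_idx 0 hp']
    exact pv_wrapN_lt _ _ (hbd _ (List.getElem_mem hp')).1 (hbd _ (List.getElem_mem hp')).2
  have hfg : ∀ p, p < dims.length → f (g p) = p := by
    intro p hp
    rw [hfdef]
    simp only [List.getD_eq_getElem?_getD, hvalg p hp]
    simp
  have hfull : ∀ k, k < dims.length →
      Lf[k]? = some (some ((f k : Nat) : Int)) ∧ f k < dims.length ∧ g (f k) = k := by
    intro k hk
    obtain ⟨p, hp, hpk⟩ := List.mem_iff_getElem.mp (hcov k hk)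
    have hp' : p < dims.length := by
      rw [List.length_map] at hp
      omega
    have hLk : Lf[k]? = some (some ((p : Nat) : Int)) := by
      rw [← hvalg p hp']
      congr 1
      rw [hgdef]
      simp only [List.getD_eq_getElem pos_to_idx 0 (by omega : p < pos_to_idx.length)]
      simp only [List.getElem_map] at hpk
      exact hpk.symm
    have hfk : f k = p := by
      rw [hfdef]
      simp only [List.getD_eq_getElem?_getD, hLk]
      simp
    refine ⟨by rw [hLk, hfk], by omega, ?_⟩
    rw [hfk, hgdef]
    simp only [List.getD_eq_getElem pos_to_idx 0 (by omega : p < pos_to_idx.length)]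
    simp only [List.getElem_map] at hpk
    exact hpk
  have hf : ∀ k, k < dims.length → Lf[k]? = some (some ((f k : Nat) : Int)) :=
    fun k hk => (hfull k hk).1
  have hfn : ∀ k, k < dims.length → f k < dims.length := fun k hk => (hfull k hk).2.1
  have hgf : ∀ k, k < dims.length → g (f k) = k := fun k hk => (hfull k hk).2.2
  have hA := pv_loopA dims Lf f g hLlen hf hfn hgf hfg dims.length (le_refl _)
    (List.replicate dims.length none) (by simp)
    (by intro k hk
        rw [List.getElem?_replicate_of_lt (by omega)]
        rw [if_neg (by have := hg k hk; omega)])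
  have hB := pv_loopB dims Lf f g hLlen hf hfn hgf hfg hg dims.length 0 (by omega)
    (List.replicate dims.length none) (by simp)
    (by intro k hk
        rw [List.getElem?_replicate_of_lt (by omega)]
        rw [if_neg (by omega)])
  rw [show ((0 : Nat) : Int) = (0 : Int) from rfl] at hB
  unfold infer_reordered_shape infer_reordered_shape_alt
  simp only [hbuild, hA, hB]

-- ===== VERDICT (by name: the statement is the Claim_ definition above) =====
theorem infer_reordered_shape_spec : Claim_equal_infer_reordered_shape := by
  intro dims pos_to_idx _ hpre
  unfold Spec_infer_reordered_shape
  exact pv_ports_eq dims pos_to_idx hpre
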